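-- pv_equiv track=rewrite | github.com/Yo0oN/CodingTestStudy | YoonJeong/003주차/짝지어제거하기.py | solution
-- ===== SOURCE A (Python) =====
-- def solution(s):
--     answer = 0
--     sStack = []
--
--     for i in s :
--         if len(sStack) == 0 :
--             sStack.append(i)
--
--         elif sStack[-1] == i :
--             sStack.pop()
--
--         else :
--             sStack.append(i)
--
--     if len(sStack) == 0 :
--         answer = 1
--
--     return answer
-- ===== SOURCE B (Python) =====
-- def solution(s):
--     chars = list(s)
--     while True:
--         out = []
--         i = 0
--         n = len(chars)
--         while i < n:
--             if i + 1 < n and chars[i] == chars[i + 1]: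
--                 i += 2
--             else:
--                 out.append(chars[i])
--                 i += 1
--         if out == chars:
--             break
--         chars = out
--     return 1 if not chars else 0
-- ===== Notes on version B (the rewrite author's own statement) =====
-- stated objective: alternative
-- what changed: Replaces the single-pass stack with repeated left-to-right scans that delete adjacent equal pairs until a fixpoint, then checks emptiness.
import Mathlib
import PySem

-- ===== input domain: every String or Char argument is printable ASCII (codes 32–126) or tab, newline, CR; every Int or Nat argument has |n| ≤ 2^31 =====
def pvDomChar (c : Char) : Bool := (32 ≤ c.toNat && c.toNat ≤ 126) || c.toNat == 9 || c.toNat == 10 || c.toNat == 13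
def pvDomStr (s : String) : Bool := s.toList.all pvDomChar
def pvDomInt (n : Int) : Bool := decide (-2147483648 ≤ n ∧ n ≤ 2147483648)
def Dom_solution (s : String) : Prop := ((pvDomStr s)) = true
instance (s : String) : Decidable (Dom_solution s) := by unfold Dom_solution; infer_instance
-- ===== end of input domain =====

-- B replaces A's single-pass1 stack by repeated pair-deleting scans to a fixpoint (alternative decomposition; return value only, no speed claim).

-- ===== PORT A =====
-- one iteration of A's loop body: the stack is a list with its top at the END (append/pop at the end, top = sStack[-1])
def astep (st : List Char) (i : Char) : List Char :=
  if st.length = 0 then st ++ [i]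
  else if st.getLast? = some i then st.dropLast
  else st ++ [i]

def solution (s : String) : Int :=
  let sStack := s.toList.foldl astep []
  if sStack.length = 0 then 1 else 0

-- ===== PORT B =====
-- one left-to-right scan deleting every (non-overlapping, leftmost-first) adjacent equal pair
def pass1 : List Char → List Char
  | [] => []
  | [c] => [c]
  | a :: b :: t => if a = b then pass1 t else a :: pass1 (b :: t)

-- (pass1 xs).length <= xs.length; strict when pass1 changed something (termination of the fixpoint loop)
theorem pass_shrink : ∀ xs : List Char, pass1 xs = xs ∨ (pass1 xs).length + 2 ≤ xs.length := by
  intro xs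
  fun_induction pass1 with
  | case1 => exact Or.inl rfl
  | case2 c => exact Or.inl rfl
  | case3 b t ih =>
      right
      rcases ih with h | h <;> simp [h]; omega
  | case4 a b t hab ih =>
      rcases ih with h | h
      · left; simp [pass1, hab, h]
      · right; simp [pass1] at *; omega

theorem pass_lt {xs : List Char} (h : pass1 xs ≠ xs) : (pass1 xs).length < xs.length := by
  rcases pass_shrink xs with h' | h'
  · exact absurd h' h
  · omega

-- B's outer while-loop: apply `pass1` until nothing changes
def fixpass (xs : List Char) : List Char :=
  let ys := pass1 xs
  if ys = xs then xs else fixpass ys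
termination_by xs.length
decreasing_by exact pass_lt (by assumption)

def solution_alt (s : String) : Int :=
  if fixpass s.toList = [] then 1 else 0

-- ===== PRECONDITION & SPEC =====
def Spec_solution (s : String) (out : Int) : Prop := out = solution_alt s
instance (s : String) (out : Int) : Decidable (Spec_solution s out) := by unfold Spec_solution; infer_instance

-- ===== CLAIM (what is proved, stated in full; the proofs are below) =====
def Claim_equal_solution : Prop := ∀ (s : String), Dom_solution s → Spec_solution s (solution s)

-- ===== LEMMAS AND PROOFS =====

-- mirror of astep with the stack top at the FRONT (proof-side only)
def rstep (r : List Char) (c : Char) : List Char :=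
  match r with
  | [] => [c]
  | d :: t => if d = c then t else c :: d :: t

theorem astep_eq (st : List Char) (c : Char) : astep st c = (rstep st.reverse c).reverse := by
  cases st using List.reverseRecOn with
  | nil => simp [astep, rstep]
  | append_singleton t d =>
      by_cases h : d = c <;> simp [astep, rstep, h]

theorem foldl_astep_eq (xs : List Char) :
    ∀ st : List Char, xs.foldl astep st = (xs.foldl rstep st.reverse).reverse := by
  induction xs with
  | nil => simp
  | cons c t ih =>
      intro st
      simp only [List.foldl_cons, astep_eq, ih, List.reverse_reverse]

-- no two adjacent equal chars
def NoAdj (r : List Char) : Prop := List.IsChain (· ≠ ·) r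

theorem rstep_noAdj {r : List Char} (h : NoAdj r) (c : Char) : NoAdj (rstep r c) := by
  cases r with
  | nil => simp [rstep, NoAdj]
  | cons d t =>
      by_cases hdc : d = c
      · simpa [rstep, hdc, NoAdj] using h.tail
      · simp only [NoAdj, rstep, if_neg hdc]
        exact List.isChain_cons_cons.mpr ⟨fun e => hdc e.symm, h⟩

theorem rstep_rstep {r : List Char} (h : NoAdj r) (c : Char) : rstep (rstep r c) c = r := by
  cases r with
  | nil => simp [rstep]
  | cons d t =>
      by_cases hdc : d = c
      · subst hdc
        cases t with
        | nil => simp [rstep]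
        | cons e u =>
            have hde : d ≠ e := (List.isChain_cons_cons.mp h).1
            simp [rstep, Ne.symm hde]
      · simp [rstep, hdc]

theorem foldl_rstep_pair {r : List Char} (h : NoAdj r) (c : Char) (t : List Char) :
    (c :: c :: t).foldl rstep r = t.foldl rstep r := by
  simp [List.foldl_cons, rstep_rstep h c]

-- one pass does not change the stack normal form
theorem foldl_rstep_pass (xs : List Char) :
    ∀ r : List Char, NoAdj r → (pass1 xs).foldl rstep r = xs.foldl rstep r := by
  fun_induction pass1 with
  | case1 => intro r _; rfl
  | case2 c => intro r _; rfl
  | case3 b t ih =>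
      intro r h
      rw [ih r h, foldl_rstep_pair h]
  | case4 a b t hab ih =>
      intro r h
      simp only [List.foldl_cons]
      exact ih (rstep r a) (rstep_noAdj h a)

theorem fixpass_foldl (xs : List Char) :
    (fixpass xs).foldl rstep [] = xs.foldl rstep [] := by
  fun_induction fixpass with
  | case1 xs ys h => rfl
  | case2 xs ys h ih =>
      rw [ih]
      exact foldl_rstep_pass xs [] (by simp [NoAdj])

theorem fixpass_fix (xs : List Char) : pass1 (fixpass xs) = fixpass xs := by
  fun_induction fixpass with
  | case1 xs ys h => exact h
  | case2 xs ys h ih => exact ih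

-- a fixpoint of pass1 has no adjacent equal chars
theorem noAdj_of_pass_fix : ∀ z : List Char, pass1 z = z → NoAdj z := by
  intro z
  induction z using pass1.induct with
  | case1 => intro _; simp [NoAdj]
  | case2 c => intro _; simp [NoAdj]
  | case3 b t ih =>
      intro h
      exfalso
      simp only [pass1] at h
      have hl := congrArg List.length h
      simp at hl
      rcases pass_shrink t with h' | h'
      · rw [h'] at hl; omega
      · omega
  | case4 a b t hab ih =>
      intro h
      simp only [pass1, if_neg hab, List.cons.injEq, true_and] at h
      exact List.isChain_cons_cons.mpr ⟨hab, ih h⟩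

-- folding rstep over an adjacent-free list just reverses it onto the stack
theorem foldl_rstep_noAdj_id : ∀ (z r : List Char), NoAdj (r.reverse ++ z) →
    z.foldl rstep r = z.reverse ++ r := by
  intro z
  induction z with
  | nil => intro r _; simp
  | cons c z' ih =>
      intro r h
      cases r with
      | nil =>
          have := ih [c] (by simpa [NoAdj] using h)
          simpa [rstep] using this
      | cons d t =>
          have hdc : d ≠ c := by
            have := (List.isChain_append.mp h).2.2
            exact this d (by simp) c (by simp)
          have harg : NoAdj ((c :: d :: t).reverse ++ z') := by
            simp only [NoAdj] at h ⊢
            simpa using h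
          have := ih (c :: d :: t) harg
          simp only [List.foldl_cons, rstep, if_neg hdc] at *
          simpa using this

theorem fixpass_eq_reverse (xs : List Char) :
    xs.foldl rstep [] = (fixpass xs).reverse := by
  rw [← fixpass_foldl]
  have h := noAdj_of_pass_fix (fixpass xs) (fixpass_fix xs)
  simpa using foldl_rstep_noAdj_id (fixpass xs) [] (by simpa [NoAdj] using h)

-- ===== VERDICT (by name: the statement is the Claim_ definition above) =====
theorem solution_spec : Claim_equal_solution := by
  intro s _
  unfold Spec_solution solution solution_alt
  have h1 : s.toList.foldl astep [] = fixpass s.toList := by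
    rw [foldl_astep_eq]
    simp [fixpass_eq_reverse]
  rw [h1]
  rcases eq_or_ne (fixpass s.toList) [] with h | h
  · simp [h]
  · simp [h, List.length_eq_zero_iff]
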